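-- pv_equiv track=rewrite | github.com/abey79/aoc | aoc2021/day16.py | extract_literal
-- ===== SOURCE A (Python) =====
-- def extract_literal(packet: str, pc: int) -> (int, int):
--     res = ""
--     while True:
--         res += packet[pc + 1 : pc + 5]
--         pc += 5
--         if packet[pc - 5] == "0":
--             break
--
--     return int(res, base=2), pc
-- ===== SOURCE B (Python) =====
-- def extract_literal(packet: str, pc: int) -> (int, int):
--     # Boundary: lead bits live at stride 5; the literal ends at the first '0' lead bit.
--     end = pc + 5 * (packet[pc::5].index("0") + 1)
--     # Payload: one slice of the whole literal region, dropping every 5th char (the lead bits).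
--     bits = "".join(c for i, c in enumerate(packet[pc:end]) if i % 5 != 0)
--     return int(bits, base=2), end
-- ===== Notes on version B (the rewrite author's own statement) =====
-- stated objective: alternative
-- what changed: Replaces A's single interleaved loop (per-group slicing, string += accumulation, termination test on each lead char) with loop-free library-level passes: the literal's end is located by one strided slice packet[pc::5] plus str.index('0'), and the payload is one slice of the whole literal region filtered by index arithmetic (dropping every 5th char) before a single int(.,2).
-- outside the precondition, e.g. on extract_literal('100', -3): A returns (0, 7), B raises ValueError
import Mathlib
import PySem

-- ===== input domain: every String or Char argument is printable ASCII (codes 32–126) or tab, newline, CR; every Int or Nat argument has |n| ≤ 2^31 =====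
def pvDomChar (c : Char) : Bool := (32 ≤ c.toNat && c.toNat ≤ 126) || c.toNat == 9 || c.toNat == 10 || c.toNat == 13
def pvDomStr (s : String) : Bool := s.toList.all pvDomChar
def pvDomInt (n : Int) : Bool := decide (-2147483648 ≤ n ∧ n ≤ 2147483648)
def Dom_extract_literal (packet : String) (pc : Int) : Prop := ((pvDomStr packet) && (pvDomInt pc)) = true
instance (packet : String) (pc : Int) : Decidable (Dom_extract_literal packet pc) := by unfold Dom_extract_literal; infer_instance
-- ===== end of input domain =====

-- B replaces A's single interleaved gather loop by loop-free passes (strided slice + index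
-- for the boundary, one region slice with an index-mod filter for the payload); same cost,
-- proved to return the same pair on every input admitted by Pre_.


-- ===== PORT A =====
-- A's 'while True' loop: accumulate the payload slice, advance pc by 5, break when the
-- group's lead bit packet[pc-5] is '0'.  Fuel only guards totality (the Python loop either
-- breaks or runs off the string into an IndexError, which Pre_ excludes; on excluded inputs
-- the fuel-0 / none branches return the current state, a value nothing is claimed about).
def pvLoopA (L : List Char) (fuel : Nat) (res : List Char) (pc : Int) : List Char × Int :=
  match fuel with
  | 0 => (res, pc)
  | fuel + 1 =>
    let res' := res ++ PySem.List.slice L (some (pc + 1)) (some (pc + 5))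
    let pc' := pc + 5
    match PySem.List.pyGet? L (pc' - 5) with
    | none => (res', pc')          -- Python raises IndexError here (outside Pre_)
    | some c => if c = '0' then (res', pc') else pvLoopA L fuel res' pc'

def extract_literal (packet : String) (pc : Int) : Int × Int :=
  let L := packet.toList
  let r := pvLoopA L (L.length + pc.natAbs + 2) [] pc
  -- int(res, base=2); on failure Python raises ValueError (outside Pre_), .getD 0 is junk there
  ((PySem.Int.ofCharsBase? r.1 2).getD 0, r.2)

-- ===== PORT B =====
-- Source B: end = pc + 5 * (packet[pc::5].index("0") + 1);
--       bits = "".join(c for i, c in enumerate(packet[pc:end]) if i % 5 != 0);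
--       return int(bits, base=2), end
def extract_literal_alt (packet : String) (pc : Int) : Int × Int :=
  let L := packet.toList
  let strided := (PySem.List.slice? L (some pc) none 5).getD []  -- step is the literal 5 ≠ 0: slice? is always some
  let k := (PySem.List.index? strided '0').getD 0                -- none = Python ValueError from str.index (outside Pre_)
  let e := pc + 5 * ((k : Int) + 1)
  let bits := (PySem.List.enumerate (PySem.List.slice L (some pc) (some e)) 0).foldl
      (fun acc p => if PySem.Int.mod p.1 5 ≠ 0 then acc ++ [p.2] else acc) []
  ((PySem.Int.ofCharsBase? bits 2).getD 0, e)

-- ===== PRECONDITION & SPEC =====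
-- Pre_ = the inputs on which A returns normally AND the literal occupies one coherent
-- region of the string: scanning positions pc, pc+5, … the first lead char equal to '0'
-- is reached before any lookup leaves the string (no IndexError), the concatenation of
-- the 4-bit payload slices parses as a base-2 int (no ValueError), and either pc ≥ 0 or
-- the whole literal lies at strictly negative indices (pc + 5q + 5 < 0).  Pre_ excludes
-- negative-pc literals that reach index -1 or cross into non-negative positions, on which
-- A still returns for some strings: there A's per-index negative wraparound reads the
-- groups partly from the string's end and partly from its start, an accident of Python
-- indexing for what is a program counter, and B naturally raises or returns a different
-- value.
def Pre_extract_literal (packet : String) (pc : Int) : Prop :=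
  let L := packet.toList
  ∃ q : Nat, q ≤ L.length ∧
    (0 ≤ pc ∨ pc + 5 * q + 5 < 0) ∧
    PySem.List.pyGet? L (pc + 5 * q) = some '0' ∧
    (∀ j : Nat, j < q → PySem.List.pyGet? L (pc + 5 * j) ≠ none ∧
                        PySem.List.pyGet? L (pc + 5 * j) ≠ some '0') ∧
    PySem.Int.ofCharsBase?
      ((List.range (q + 1)).flatMap
        (fun j => PySem.List.slice L (some (pc + 5 * j + 1)) (some (pc + 5 * j + 5)))) 2 ≠ none

instance (packet : String) (pc : Int) : Decidable (Pre_extract_literal packet pc) := by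
  unfold Pre_extract_literal; infer_instance

def pvWitness_extract_literal : String × Int := ("01111", 0)

def Spec_extract_literal (packet : String) (pc : Int) (out : Int × Int) : Prop :=
  out = extract_literal_alt packet pc
instance (packet : String) (pc : Int) (out : Int × Int) : Decidable (Spec_extract_literal packet pc out) := by
  unfold Spec_extract_literal; infer_instance

-- ===== CLAIM (what is proved, stated in full; the proofs are below) =====
def Claim_equal_extract_literal : Prop :=
  ∀ (packet : String) (pc : Int), Dom_extract_literal packet pc →
    Pre_extract_literal packet pc →
    Spec_extract_literal packet pc (extract_literal packet pc)

-- ===== LEMMAS AND PROOFS =====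

-- The payload chars of groups at positions P, P+5, …, P+5q (bits 1–4 of each group,
-- clipped at the end of the string), as drop/take segments.
def pvGatherN (L : List Char) (P : Nat) : Nat → List Char
  | 0 => (L.drop (P + 1)).take 4
  | q + 1 => (L.drop (P + 1)).take 4 ++ pvGatherN L (P + 5) q

-- Python i % 5 on a natural i is plain Nat mod.
lemma pvMod5 (a : Nat) : PySem.Int.mod ((a : Nat) : Int) 5 = ((a % 5 : Nat) : Int) := by
  simp only [PySem.Int.mod]
  rw [Int.fmod_eq_emod, if_pos (Or.inl (by norm_num))]
  push_cast
  omega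

lemma pvKeep (m r : Nat) (h1 : 1 ≤ r) (h2 : r < 5) :
    decide (PySem.Int.mod ((5 * m + r : Nat) : Int) 5 ≠ 0) = true := by
  rw [pvMod5, show (5 * m + r) % 5 = r by omega]
  simp
  omega

lemma pvDrop (m : Nat) :
    ¬ (decide (PySem.Int.mod ((5 * m : Nat) : Int) 5 ≠ 0) = true) := by
  rw [pvMod5, show 5 * m % 5 = 0 by omega]
  simp

-- The effective start index of a non-crossing group position p: p itself for p ≥ 0,
-- the wrapped position p + len for a strictly negative literal.
def pvStart (n : Nat) (p : Int) : Nat := if 0 ≤ p then p.toNat else (p + n).toNat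

-- A successful Python lookup means the index is in range.
lemma pvInRange_of_get (L : List Char) (i : Int) (h : PySem.List.pyGet? L i ≠ none) :
    -(L.length : Int) ≤ i ∧ i < (L.length : Int) := by
  by_contra hc
  exact h ((PySem.List.pyGet?_eq_none_iff L i).mpr hc)

lemma pvGet_neg (L : List Char) (i : Int) (h1 : i < 0) (h2 : -(L.length : Int) ≤ i) :
    PySem.List.pyGet? L i = L[(i + (L.length : Int)).toNat]? := by
  rw [PySem.List.pyGet?_neg L h1 h2]
  congr 1
  omega

-- A slice with both bounds strictly negative and in range is a plain drop/take segment.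
lemma slice_negneg (L : List Char) (a b : Int) (ha0 : a < 0) (hb0 : b < 0)
    (han : -(L.length : Int) ≤ a) (hbn : -(L.length : Int) ≤ b) :
    PySem.List.slice L (some a) (some b) =
      (L.drop (((L.length : Int) + a).toNat)).take
        (((L.length : Int) + b).toNat - ((L.length : Int) + a).toNat) := by
  simp only [PySem.List.slice, PySem.List.clampIdx]
  rw [if_pos ha0, if_neg (by omega : ¬ (L.length : Int) + a < 0),
      if_pos hb0, if_neg (by omega : ¬ (L.length : Int) + b < 0)]

-- One group's payload slice as a drop/take segment at the effective start.
lemma pvSeg (L : List Char) (p : Int) (hlow : -(L.length : Int) ≤ p)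
    (hc : 0 ≤ p ∨ p + 5 < 0) :
    PySem.List.slice L (some (p + 1)) (some (p + 5)) =
      (L.drop (pvStart L.length p + 1)).take 4 := by
  unfold pvStart
  rcases hc with h | h
  · rw [if_pos h, PySem.List.slice_toNat L (show (0:Int) ≤ p + 1 by omega) (show (0:Int) ≤ p + 5 by omega),
        show (p + 5).toNat - (p + 1).toNat = 4 by omega,
        show (p + 1).toNat = p.toNat + 1 by omega]
  · rw [if_neg (by omega), slice_negneg L (p + 1) (p + 5) (by omega) (by omega) (by omega) (by omega),
        show ((L.length : Int) + (p + 5)).toNat - ((L.length : Int) + (p + 1)).toNat = 4 by omega,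
        show ((L.length : Int) + (p + 1)).toNat = (p + (L.length : Int)).toNat + 1 by omega]

-- A's loop invariant: if the first '0' lead char on the stride p, p+5, … is q groups ahead
-- (every earlier lead char exists and differs from '0') and the literal does not cross
-- index 0, the loop stops at p + 5*q + 5 having accumulated the payload segments pvGatherN.
lemma pvLoopA_eq_gather (L : List Char) :
    ∀ (q : Nat) (fuel : Nat) (res : List Char) (p : Int), q < fuel →
      (0 ≤ p ∨ p + 5 * (q : Int) + 5 < 0) →
      PySem.List.pyGet? L (p + 5 * q) = some '0' →
      (∀ j : Nat, j < q → PySem.List.pyGet? L (p + 5 * j) ≠ none ∧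
                          PySem.List.pyGet? L (p + 5 * j) ≠ some '0') →
      pvLoopA L fuel res p = (res ++ pvGatherN L (pvStart L.length p) q, p + 5 * q + 5) := by
  intro q
  induction q with
  | zero =>
    intro fuel res p hf hcs h0 _
    match fuel, hf with
    | fuel + 1, _ =>
      have h0' : PySem.List.pyGet? L p = some '0' := by
        rwa [show p + 5 * ((0 : Nat) : Int) = p by push_cast; ring] at h0
      have hlow := pvInRange_of_get L p (by rw [h0']; simp)
      have hE : p + 5 * ((0 : Nat) : Int) + 5 = p + 5 := by push_cast; ring
      rw [hE]
      simp only [pvLoopA, pvGatherN]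
      rw [show p + 5 - 5 = p by ring, h0',
          pvSeg L p hlow.1 (hcs.imp id (fun h => by omega))]
      simp
  | succ q ih =>
    intro fuel res p hf hcs h0 hne
    match fuel, hf with
    | fuel + 1, hf =>
      have hE : p + 5 * ((q + 1 : Nat) : Int) + 5 = p + 5 + 5 * (q : Int) + 5 := by
        push_cast; ring
      rw [hE]
      have hp0 := hne 0 (Nat.succ_pos q)
      rw [show p + 5 * ((0 : Nat) : Int) = p by push_cast; ring] at hp0
      have hlow := pvInRange_of_get L p hp0.1
      simp only [pvLoopA]
      rw [show p + 5 - 5 = p by ring]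
      match hget : PySem.List.pyGet? L p with
      | none => exact absurd hget hp0.1
      | some c =>
        have hc : ¬ c = '0' := fun h => hp0.2 (h ▸ hget)
        simp only [hc, if_false]
        rw [ih fuel _ (p + 5) (by omega)
          (hcs.imp (fun h => by omega) (fun h => by push_cast at h ⊢; omega))
          (by rw [show p + 5 + 5 * (q : Int) = p + 5 * ((q + 1 : Nat) : Int) by push_cast; ring]
              exact h0)
          (by intro j hj
              have := hne (j + 1) (by omega)
              rwa [show p + 5 * ((j + 1 : Nat) : Int) = p + 5 + 5 * (j : Int) by push_cast; ring]
                at this)]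
        have hsa : pvStart L.length (p + 5) = pvStart L.length p + 5 := by
          unfold pvStart
          rcases hcs with h | h
          · rw [if_pos h, if_pos (by omega)]
            omega
          · have hpneg : p < 0 := by push_cast at h; omega
            rw [if_neg (by push_cast at h; omega), if_neg (by omega)]
            omega
        simp only [pvGatherN]
        rw [hsa, pvSeg L p hlow.1 (hcs.imp id (fun h => by push_cast at h; omega)),
            List.append_assoc]

-- index? from element-wise facts: first occurrence of '0' is at position q.
lemma index?_of_getElem (xs : List Char) :
    ∀ (q : Nat), xs[q]? = some '0' → (∀ j : Nat, j < q → xs[j]? ≠ some '0') →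
      PySem.List.index? xs '0' = some q := by
  induction xs with
  | nil => intro q h1 _; simp at h1
  | cons x t ih =>
    intro q h1 h2
    cases q with
    | zero =>
      simp at h1
      rw [h1]
      exact PySem.List.index?_cons_self '0' t
    | succ q =>
      have hx : x ≠ '0' := by
        intro h
        exact h2 0 (Nat.succ_pos q) (by simp [h])
      rw [PySem.List.index?_cons_of_ne t hx,
          ih q (by simpa using h1) (fun j hj => by
            have := h2 (j + 1) (by omega)
            simpa using this)]
      rfl

-- The strided slice packet[pc::5] is the list of lead chars from the effective start.
lemma strided_eq (L : List Char) (pc : Int) (hlow : -(L.length : Int) ≤ pc)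
    (hlt : pc < (L.length : Int)) :
    PySem.List.slice? L (some pc) none 5 =
      some ((List.range ((((L.length : Int) - (pvStart L.length pc : Nat) + 4) / 5).toNat)).map
        (fun k => L.getD (pvStart L.length pc + 5 * k) 'z')) := by
  have hS : ((pvStart L.length pc : Nat) : Int) < (L.length : Int) := by
    unfold pvStart
    by_cases h : 0 ≤ pc
    · rw [if_pos h]; omega
    · rw [if_neg h]; omega
  have hsi : PySem.List.sliceIndices L.length (some pc) none 5 =
      (((pvStart L.length pc : Nat) : Int), (L.length : Int), 5) := by
    unfold pvStart
    by_cases h : 0 ≤ pc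
    · have h' : ¬ pc < 0 := by omega
      rw [if_pos h]
      simp [PySem.List.sliceIndices, h']
      omega
    · have h' : pc < 0 := by omega
      rw [if_neg h]
      simp [PySem.List.sliceIndices, h']
  simp only [PySem.List.slice?, hsi,
    if_neg (show ¬ (5 : Int) = 0 by norm_num),
    if_pos (show (0 : Int) < 5 by norm_num), if_pos hS]
  rw [show (L.length : Int) - (pvStart L.length pc : Nat) + 5 - 1 =
        (L.length : Int) - (pvStart L.length pc : Nat) + 4 by ring]
  congr 1
  have hall : ∀ k ∈ List.range ((((L.length : Int) - (pvStart L.length pc : Nat) + 4) / 5).toNat),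
      L[(((pvStart L.length pc : Nat) : Int) + 5 * (k : Int)).toNat]? =
        some (L.getD (pvStart L.length pc + 5 * k) 'z') := by
    intro k hk
    rw [List.mem_range] at hk
    have hklt : pvStart L.length pc + 5 * k < L.length := by
      have h5 : ((k : Int) + 1) * 5 ≤ (L.length : Int) - (pvStart L.length pc : Nat) + 4 := by
        have := (Int.le_ediv_iff_mul_le (by norm_num : (0:Int) < 5)).mp
          (by omega : ((k : Int) + 1) ≤
            ((L.length : Int) - (pvStart L.length pc : Nat) + 4) / 5)
        omega
      omega
    rw [show (((pvStart L.length pc : Nat) : Int) + 5 * (k : Int)).toNat =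
          pvStart L.length pc + 5 * k by omega,
        List.getElem?_eq_getElem (by omega), List.getD_eq_getElem _ _ (by omega)]
  refine (List.filterMap_congr hall).trans ?_
  simp

-- Payload chars with indices ≥ 1 (mod 5) in a short tail are all kept by the filter.
lemma filt_tail (l : List Char) :
    ∀ (m r : Nat), 1 ≤ r → r + l.length ≤ 5 →
      ((PySem.List.enumerate l ((5 * m + r : Nat) : Int)).filter
        (fun pr => decide (PySem.Int.mod pr.1 5 ≠ 0))).map Prod.snd = l := by
  induction l with
  | nil => intro m r _ _; simp [PySem.List.enumerate]
  | cons x t ih =>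
    intro m r hr hle
    simp only [List.length_cons] at hle
    rw [PySem.List.enumerate_cons, List.filter_cons,
        if_pos (pvKeep m r hr (by omega)), List.map_cons,
        show ((5 * m + r : Nat) : Int) + 1 = ((5 * m + (r + 1) : Nat) : Int) by push_cast; ring,
        ih m (r + 1) (by omega) (by omega)]

-- The region slice, filtered by index arithmetic, is exactly the gathered payload.
lemma filt_chunk (L : List Char) :
    ∀ (q P m : Nat), P + 5 * q < L.length →
      ((PySem.List.enumerate ((L.drop P).take (5 * q + 5)) ((5 * m : Nat) : Int)).filter
        (fun pr => decide (PySem.Int.mod pr.1 5 ≠ 0))).map Prod.snd = pvGatherN L P q := by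
  intro q
  induction q with
  | zero =>
    intro P m hlt
    cases hL : L.drop P with
    | nil =>
      have := congrArg List.length hL
      simp at this
      omega
    | cons a t =>
      have ht : L.drop (P + 1) = t := by
        rw [← List.tail_drop, hL, List.tail_cons]
      simp only [pvGatherN]
      rw [ht, show (5 * 0 + 5 : Nat) = 4 + 1 from rfl, List.take_succ_cons,
          PySem.List.enumerate_cons, List.filter_cons, if_neg (pvDrop m),
          show ((5 * m : Nat) : Int) + 1 = ((5 * m + 1 : Nat) : Int) by push_cast; ring,
          filt_tail (t.take 4) m 1 (by omega)
            (by have := List.length_take_le 4 t; omega)]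
  | succ q ih =>
    intro P m hlt
    have hlen : 5 < (L.drop P).length := by
      rw [List.length_drop]
      omega
    have hsplit : (L.drop P).take (5 * (q + 1) + 5) =
        (L.drop P).take 5 ++ (L.drop (P + 5)).take (5 * q + 5) := by
      rw [show 5 * (q + 1) + 5 = 5 + (5 * q + 5) by ring, List.take_add, List.drop_drop]
    rw [hsplit, PySem.List.enumerate_append, List.filter_append, List.map_append]
    simp only [pvGatherN]
    congr 1
    · cases hL : L.drop P with
      | nil => rw [hL] at hlen; simp at hlen
      | cons a t =>
        have ht : L.drop (P + 1) = t := by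
          rw [← List.tail_drop, hL, List.tail_cons]
        have hl := congrArg List.length hL
        simp only [List.length_drop, List.length_cons] at hl
        rw [ht, show (5 : Nat) = 4 + 1 from rfl, List.take_succ_cons,
            PySem.List.enumerate_cons, List.filter_cons, if_neg (pvDrop m),
            show ((5 * m : Nat) : Int) + 1 = ((5 * m + 1 : Nat) : Int) by push_cast; ring,
            filt_tail (t.take 4) m 1 (by omega)
              (by rw [List.length_take]; omega)]
    · have hoff : ((5 * m : Nat) : Int) + (((L.drop P).take 5).length : Int) =
          ((5 * (m + 1) : Nat) : Int) := by
        rw [List.length_take]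
        push_cast
        omega
      rw [hoff, ih (P + 5) (m + 1) (by omega)]

-- ===== VERDICT (by name: the statement is the Claim_ definition above) =====
theorem extract_literal_spec : Claim_equal_extract_literal := by
  intro packet pc _ hpre
  obtain ⟨q, hq, hcs, h0, hne, _⟩ := hpre
  unfold Spec_extract_literal
  -- position 0 of the scan is in range, so pc itself is
  have h00 : PySem.List.pyGet? packet.toList (pc + 5 * ((0 : Nat) : Int)) ≠ none := by
    cases q with
    | zero => rw [h0]; simp
    | succ q' => exact (hne 0 (by omega)).1
  have hlow0 := pvInRange_of_get packet.toList (pc + 5 * ((0 : Nat) : Int)) h00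
  have hlow : -(packet.toList.length : Int) ≤ pc ∧ pc < (packet.toList.length : Int) := by
    push_cast at hlow0
    constructor <;> omega
  -- every scanned lead char sits at the effective start + 5j
  have hget : ∀ j : Nat, j ≤ q →
      PySem.List.pyGet? packet.toList (pc + 5 * (j : Int)) =
        packet.toList[pvStart packet.toList.length pc + 5 * j]? := by
    intro j hj
    unfold pvStart
    rcases hcs with hpos | hneg
    · rw [if_pos hpos,
          PySem.List.pyGet?_of_nonneg packet.toList (by omega : (0:Int) ≤ pc + 5 * (j : Int))]
      congr 1
      omega
    · rw [if_neg (by omega),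
          pvGet_neg packet.toList (pc + 5 * (j : Int)) (by omega) (by omega)]
      congr 1
      omega
  have h0n : packet.toList[pvStart packet.toList.length pc + 5 * q]? = some '0' := by
    rw [← hget q le_rfl]
    exact h0
  obtain ⟨hqlt, hq0⟩ := List.getElem?_eq_some_iff.mp h0n
  -- A's side
  simp only [extract_literal]
  rw [pvLoopA_eq_gather packet.toList q _ [] pc (by omega) hcs h0 hne]
  -- B's side
  simp only [extract_literal_alt]
  rw [strided_eq packet.toList pc hlow.1 hlow.2, Option.getD_some]
  have hqcnt : q <
      ((((packet.toList.length : Int) - (pvStart packet.toList.length pc : Nat) + 4) / 5).toNat) := by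
    have h5 : ((q : Int) + 1) ≤
        ((packet.toList.length : Int) - (pvStart packet.toList.length pc : Nat) + 4) / 5 := by
      rw [Int.le_ediv_iff_mul_le (by norm_num : (0:Int) < 5)]
      omega
    omega
  have hidx : PySem.List.index?
      ((List.range ((((packet.toList.length : Int) - (pvStart packet.toList.length pc : Nat) + 4) / 5).toNat)).map
        (fun k => packet.toList.getD (pvStart packet.toList.length pc + 5 * k) 'z')) '0' = some q := by
    apply index?_of_getElem
    · rw [List.getElem?_map, List.getElem?_range hqcnt]
      simp only [Option.map_some, Option.some.injEq]
      rw [List.getD_eq_getElem _ _ (by omega)]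
      exact hq0
    · intro j hj
      rw [List.getElem?_map, List.getElem?_range (by omega)]
      simp only [Option.map_some, ne_eq, Option.some.injEq]
      intro hbad
      apply (hne j hj).2
      rw [hget j (by omega),
          List.getElem?_eq_getElem
            (by omega : pvStart packet.toList.length pc + 5 * j < packet.toList.length)]
      rw [List.getD_eq_getElem _ _ (by omega)] at hbad
      rw [hbad]
  rw [hidx, Option.getD_some]
  -- the region slice and its filtered payload
  rw [show PySem.List.slice packet.toList (some pc) (some (pc + 5 * ((q : Int) + 1))) =
        (packet.toList.drop (pvStart packet.toList.length pc)).take (5 * q + 5) by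
      unfold pvStart
      rcases hcs with hpos | hneg
      · rw [if_pos hpos,
            PySem.List.slice_toNat packet.toList (show (0:Int) ≤ pc by omega)
              (show (0:Int) ≤ pc + 5 * ((q : Int) + 1) by omega)]
        congr 1
        omega
      · rw [if_neg (by omega),
            slice_negneg packet.toList pc (pc + 5 * ((q : Int) + 1)) (by omega) (by omega)
              (by omega) (by omega),
            show ((packet.toList.length : Int) + (pc + 5 * ((q : Int) + 1))).toNat -
                  ((packet.toList.length : Int) + pc).toNat = 5 * q + 5 by omega,
            show ((packet.toList.length : Int) + pc).toNat = (pc + (packet.toList.length : Int)).toNat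
              by omega]]
  rw [PySem.List.foldl_append_ite (fun pr : Int × Char => PySem.Int.mod pr.1 5 ≠ 0) Prod.snd]
  have hfc := filt_chunk packet.toList q (pvStart packet.toList.length pc) 0 (by omega)
  rw [show ((5 * 0 : Nat) : Int) = (0 : Int) by norm_num] at hfc
  rw [hfc, List.nil_append, show pc + 5 * (q : Int) + 5 = pc + 5 * ((q : Int) + 1) by ring]
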